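-- pv_equiv track=rewrite | github.com/ShuminFu/Nebular | Opera/core/intent_mind.py | _parse_code_resource
-- ===== SOURCE A (Python) =====
-- def _parse_code_resource(content: str) -> tuple[dict, str]:
--     """解析代码资源内容
--
--     Args:
--         content: 原始消息内容
--
--     Returns:
--         tuple[dict, str]: (元数据字典, 代码内容)
--     """
--     # 分离元数据和代码内容
--     lines = content.split("\n")
--     metadata = {}
--     code_start = 0
--
--     # 查找元数据部分
--     for i, line in enumerate(lines):
--         if line.strip() == "---":
--             code_start = i + 1
--             break
--         if line.startswith("@"):
--             key, value = line[1:].split(":", 1)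
--             metadata[key.strip()] = value.strip()
--
--     # 提取代码内容
--     code = "\n".join(lines[code_start:])
--
--     return metadata, code
-- ===== SOURCE B (Python) =====
-- def _parse_code_resource(content: str) -> tuple[dict, str]:
--     lines = content.split("\n")
--     pairs = []
--     body = None
--     for line in lines:
--         if body is not None:
--             body.append(line)
--         elif line.strip() == "---":
--             body = []
--         elif line.startswith("@"):
--             key, value = line[1:].split(":", 1)
--             pairs.append((key.strip(), value.strip()))
--     return dict(pairs), "\n".join(lines if body is None else body)
-- ===== Notes on version B (the rewrite author's own statement) =====
-- stated objective: alternative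
-- what changed: A records the separator index with an enumerate/break loop and then slices and joins lines[code_start:]; B runs a two-mode state machine over all lines that accumulates the code lines themselves and a (key,value) pair list, building the dict once at the end with dict(pairs) instead of inserting during the scan.
import Mathlib
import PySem

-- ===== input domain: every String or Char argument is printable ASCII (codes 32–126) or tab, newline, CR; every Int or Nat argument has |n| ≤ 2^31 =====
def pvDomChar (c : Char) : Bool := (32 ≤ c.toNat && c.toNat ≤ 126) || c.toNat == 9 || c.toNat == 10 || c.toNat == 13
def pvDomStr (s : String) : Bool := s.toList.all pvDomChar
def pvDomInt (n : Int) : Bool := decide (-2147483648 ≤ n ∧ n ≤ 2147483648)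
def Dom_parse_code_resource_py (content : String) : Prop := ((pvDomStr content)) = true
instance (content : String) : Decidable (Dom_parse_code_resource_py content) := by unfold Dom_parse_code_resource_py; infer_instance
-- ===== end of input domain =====

-- B replaces A's enumerate/break/index-slice loop with a two-mode state machine that
-- accumulates the code lines and a pair list, building the dict once at the end; same O(n).

-- ===== PORT A =====
-- A's for-loop over enumerate(lines) with break: carries the running index and metadata,
-- returns (metadata, code_start); code_start stays 0 when no separator is found.
-- (when an '@'-line has no ':' Python raises ValueError; Pre_ excludes that, the port skips)
def pvMetaStep (md : PySem.Dict String String) (l : String) : PySem.Dict String String :=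
  if PySem.Str.startswith l "@" then
    match PySem.Str.splitMax? (PySem.Str.slice l (some 1) none) ":" 1 with
    | some [k, v] => md.insert (PySem.Str.strip k) (PySem.Str.strip v)
    | _ => md
  else md

def pvLoopA : List String → Nat → PySem.Dict String String → PySem.Dict String String × Nat
  | [], _, md => (md, 0)
  | l :: rest, i, md =>
    if PySem.Str.strip l == "---" then (md, i + 1)
    else pvLoopA rest (i + 1) (pvMetaStep md l)

def parse_code_resource_py (content : String) : (List (String × String)) × String :=
  let lines := (PySem.Str.split? content "\n").getD []
  let r := pvLoopA lines 0 PySem.Dict.empty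
  (r.1.items, PySem.Str.join "\n" (lines.drop r.2))

-- ===== PORT B =====
-- state: (pairs collected so far, body = none before the separator / some acc after it)
def pvStepB (st : List (String × String) × Option (List String)) (l : String) :
    List (String × String) × Option (List String) :=
  match st.2 with
  | some acc => (st.1, some (acc ++ [l]))
  | none =>
    if PySem.Str.strip l == "---" then (st.1, some [])
    else if PySem.Str.startswith l "@" then
      match PySem.Str.splitMax? (PySem.Str.slice l (some 1) none) ":" 1 with
      | some [k, v] => (st.1 ++ [(PySem.Str.strip k, PySem.Str.strip v)], none)
      | _ => (st.1, none)
    else (st.1, none)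

def parse_code_resource_py_alt (content : String) : (List (String × String)) × String :=
  let lines := (PySem.Str.split? content "\n").getD []
  let st := lines.foldl pvStepB ([], none)
  ((st.1.foldl (fun d kv => d.insert kv.1 kv.2) PySem.Dict.empty).items,
   PySem.Str.join "\n" (match st.2 with | none => lines | some body => body))

-- ===== PRECONDITION & SPEC =====
-- Pre_ excludes exactly the inputs where Python raises ValueError: a line before the
-- separator that starts with '@' but contains no ':' after it.
def Pre_parse_code_resource_py (content : String) : Prop :=
  ∀ l ∈ ((PySem.Str.split? content "\n").getD []).takeWhile
          (fun l => !(PySem.Str.strip l == "---")),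
    PySem.Str.startswith l "@" = true →
      PySem.Str.isIn ":" (PySem.Str.slice l (some 1) none) = true
instance (content : String) : Decidable (Pre_parse_code_resource_py content) := by
  unfold Pre_parse_code_resource_py; infer_instance

def pvWitness_parse_code_resource_py : String := "@a: b\n---\ncode"

def Spec_parse_code_resource_py (content : String) (out : (List (String × String)) × String) : Prop := out = parse_code_resource_py_alt content
instance (content : String) (out : (List (String × String)) × String) : Decidable (Spec_parse_code_resource_py content out) := by unfold Spec_parse_code_resource_py; infer_instance

-- ===== CLAIM (what is proved, stated in full; the proofs are below) =====
def Claim_equal_parse_code_resource_py : Prop := ∀ (content : String), Dom_parse_code_resource_py content → Pre_parse_code_resource_py content → Spec_parse_code_resource_py content (parse_code_resource_py content)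

-- ===== LEMMAS AND PROOFS =====

-- the pairs a single line contributes
def pvPairs (l : String) : List (String × String) :=
  if PySem.Str.startswith l "@" then
    match PySem.Str.splitMax? (PySem.Str.slice l (some 1) none) ":" 1 with
    | some [k, v] => [(PySem.Str.strip k, PySem.Str.strip v)]
    | _ => []
  else []

theorem pvMetaStep_eq (md : PySem.Dict String String) (l : String) :
    pvMetaStep md l = (pvPairs l).foldl (fun d kv => d.insert kv.1 kv.2) md := by
  unfold pvMetaStep pvPairs
  split_ifs with h <;> [skip; rfl]
  cases hs : PySem.Str.splitMax? (PySem.Str.slice l (some 1) none) ":" 1 with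
  | none => rfl
  | some xs => match xs with
    | [] => rfl
    | [_] => rfl
    | [_, _] => rfl
    | _ :: _ :: _ :: _ => rfl

theorem pvFoldMeta_eq (ls : List String) (md : PySem.Dict String String) :
    ls.foldl pvMetaStep md =
      (ls.flatMap pvPairs).foldl (fun d kv => d.insert kv.1 kv.2) md := by
  induction ls generalizing md with
  | nil => rfl
  | cons l rest ih =>
    simp only [List.foldl_cons, List.flatMap_cons, List.foldl_append, pvMetaStep_eq]
    exact ih _

-- after the separator B only appends lines to the body
theorem pvStepB_after (ls : List String) (p : List (String × String)) (acc : List String) :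
    ls.foldl pvStepB (p, some acc) = (p, some (acc ++ ls)) := by
  induction ls generalizing acc with
  | nil => simp
  | cons l rest ih => simp [pvStepB, ih]

-- B's fold characterised by the position of the first separator line
theorem pvFoldB_eq (ls : List String) (p : List (String × String)) :
    ls.foldl pvStepB (p, none) =
      match ls.findIdx? (fun l => PySem.Str.strip l == "---") with
      | none => (p ++ ls.flatMap pvPairs, none)
      | some j => (p ++ (ls.take j).flatMap pvPairs, some (ls.drop (j + 1))) := by
  induction ls generalizing p with
  | nil => simp
  | cons l rest ih =>
    by_cases h : (PySem.Str.strip l == "---") = true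
    · have h0 : pvStepB (p, none) l = (p, some []) := by
        show (if PySem.Str.strip l == "---" then (p, some []) else _) = _
        rw [h, if_pos rfl]
      simp only [List.foldl_cons, h0, pvStepB_after, List.findIdx?_cons, h, if_true,
        List.take_zero, List.flatMap_nil, List.append_nil, List.drop_succ_cons,
        List.drop_zero, List.nil_append]
    · rw [Bool.not_eq_true] at h
      have hb : pvStepB (p, none) l = (p ++ pvPairs l, none) := by
        show (if PySem.Str.strip l == "---" then _ else
              if PySem.Str.startswith l "@" then _ else _) = _
        rw [h, if_neg (by decide : ¬(false = true))]
        unfold pvPairs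
        cases hst : PySem.Str.startswith l "@" with
        | false =>
          rw [if_neg (by decide : ¬(false = true)), if_neg (by decide : ¬(false = true)),
            List.append_nil]
        | true =>
          rw [if_pos rfl, if_pos rfl]
          cases hs : PySem.Str.splitMax? (PySem.Str.slice l (some 1) none) ":" 1 with
          | none => rw [List.append_nil]
          | some xs => match xs with
            | [] => rw [List.append_nil]
            | [_] => rw [List.append_nil]
            | [_, _] => rfl
            | _ :: _ :: _ :: _ => rw [List.append_nil]
      simp only [List.foldl_cons, hb, List.findIdx?_cons, h, Bool.false_eq_true, if_false]
      rw [ih]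
      cases hf : rest.findIdx? (fun l => PySem.Str.strip l == "---") with
      | none => simp only [Option.map_none, List.flatMap_cons, List.append_assoc]
      | some j =>
        simp only [Option.map_some, List.take_succ_cons, List.drop_succ_cons,
          List.flatMap_cons, List.append_assoc]

-- A's break-loop characterised the same way (code_start = j+1, or 0 when absent)
theorem pvLoopA_eq (lines : List String) (i : Nat) (md : PySem.Dict String String) :
    pvLoopA lines i md =
      match lines.findIdx? (fun l => PySem.Str.strip l == "---") with
      | none => (lines.foldl pvMetaStep md, 0)
      | some j => ((lines.take j).foldl pvMetaStep md, i + j + 1) := by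
  induction lines generalizing i md with
  | nil => rfl
  | cons l rest ih =>
    by_cases h : (PySem.Str.strip l == "---") = true
    · simp [pvLoopA, h, List.findIdx?_cons]
    · simp only [pvLoopA, h, if_false, List.findIdx?_cons, Bool.false_eq_true]
      rw [ih (i + 1) (pvMetaStep md l)]
      cases hf : rest.findIdx? (fun l => PySem.Str.strip l == "---") with
      | none => simp [List.foldl_cons]
      | some j => simp [List.take_succ_cons, List.foldl_cons]; omega

-- ===== VERDICT (by name: the statement is the Claim_ definition above) =====
theorem parse_code_resource_py_spec : Claim_equal_parse_code_resource_py := by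
  intro content _ _
  show parse_code_resource_py content = parse_code_resource_py_alt content
  simp only [parse_code_resource_py, parse_code_resource_py_alt]
  rw [pvLoopA_eq, pvFoldB_eq]
  cases hf : ((PySem.Str.split? content "\n").getD []).findIdx?
      (fun l => PySem.Str.strip l == "---") <;>
    simp [pvFoldMeta_eq]
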